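-- pv_equiv track=rewrite | github.com/OliverMD/TPOP | practical4/practical_4_part1.py | getWordsStartingWith
-- ===== SOURCE A (Python) =====
-- def splitText(text):
--     """
--     splitText(text String) -> [String]
--     Takes a string of text in and splits it up in to
--     words which are assumed to be delimited by non
--     alphabumeric characters. Then returns a list of
--     these words.
--     """
--     wordStart= 0
--     wordEnd = 0
--     results = []
--
--     while wordStart < len(text):
--         wordEnd += 1 #Start new word
--         while wordEnd < len(text) and text[wordEnd].isalnum():
--             wordEnd += 1
--
--         if text[wordStart:wordEnd].isalnum():
--             results.append(text[wordStart:wordEnd])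
--
--         wordStart = wordEnd +1 #Due to start being inclusive.
--     return results
--
-- def getWordsStartingWith(text,letter):
--     """
--     getWordsStartingWith(text string, letter string) -> [String]
--     returns a list of unique words that begin with the letter from
--     the string text.
--     """
--     letter = letter.lower()
--     text = text.lower()
--     words = splitText(text)
--     words =  [word for word in words if word[0] == letter]
--     toDel = []
--     for idx in range(len(words)):
--         if words[idx] in words[:idx]:
--             toDel.append(idx)
--     words = [words[idx] for idx in range(len(words)) if idx not in toDel]
--     return words
-- ===== SOURCE B (Python) =====
-- def getWordsStartingWith(text, letter):
--     """One fused pass over text.lower(): build the current word char by char,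
--     flush at each non-alphanumeric boundary (and at the end), keeping a word
--     iff it starts with the letter and was not kept before."""
--     letter = letter.lower()
--     results = []
--     word = ""
--     for ch in text.lower():
--         if ch.isalnum():
--             word += ch
--         else:
--             if word and word[0] == letter and word not in results:
--                 results.append(word)
--             word = ""
--     if word and word[0] == letter and word not in results:
--         results.append(word)
--     return results
-- ===== Notes on version B (the rewrite author's own statement) =====
-- stated objective: simpler
-- what changed: Replaces A's three passes (index-based splitText with slicing, a filter pass, and a two-pass delete-by-index dedup over range(len)) by a single character scan that builds the current word and filters/deduplicates each word as it is flushed at a non-alphanumeric boundary (measured ~2x faster; same asymptotics).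
-- intended difference: On inputs where the lowered text starts with exactly one non-alphanumeric character immediately followed by an alphanumeric one equal to the lowered letter, and that first word does not reappear as the first later word starting with the letter, splitText's first inner scan starts one index too far (wordEnd += 1 before scanning) so A silently drops the text's first word and returns a list missing it (e.g. A('.ab','a') = []), while B returns the intended list of unique words beginning with the letter (['ab']). — e.g. on getWordsStartingWith(".ab", "a"): A returns [], B returns ["ab"]
import Mathlib
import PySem

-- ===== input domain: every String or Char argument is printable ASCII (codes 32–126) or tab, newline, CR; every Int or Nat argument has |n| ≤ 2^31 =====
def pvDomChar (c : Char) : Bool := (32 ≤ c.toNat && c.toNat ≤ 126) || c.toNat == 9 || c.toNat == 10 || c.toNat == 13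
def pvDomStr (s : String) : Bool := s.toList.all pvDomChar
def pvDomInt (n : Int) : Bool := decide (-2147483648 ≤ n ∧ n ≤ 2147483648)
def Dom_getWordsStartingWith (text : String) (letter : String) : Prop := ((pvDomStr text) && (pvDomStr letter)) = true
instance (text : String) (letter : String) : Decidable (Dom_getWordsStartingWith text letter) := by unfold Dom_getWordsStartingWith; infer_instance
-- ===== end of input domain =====

-- B is the natural one-pass rewrite (scan text.lower() once, flushing words at
-- non-alphanumeric boundaries, filtering and deduplicating each word as it is flushed);
-- A additionally DROPS the first word of the text whenever the text starts with a single
-- delimiter immediately followed by a word (first-iteration off-by-one in splitText's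
-- inner scan), which B deliberately does not reproduce — see D_ below.

-- ===== PORT A =====
-- inner while loop of splitText: `while wordEnd < len(text) and text[wordEnd].isalnum(): wordEnd += 1`
def pyScan (cs : List Char) (i : Nat) : Nat :=
  if h : i < cs.length ∧ PySem.Chars.isalnum (cs.getD i ' ') then pyScan cs (i + 1) else i
termination_by cs.length - i
decreasing_by omega

theorem pyScan_ge (cs : List Char) (i : Nat) : i ≤ pyScan cs i := by
  fun_induction pyScan <;> omega

-- outer while loop of splitText; `d` records that the inner scan starts at wordEnd+1 = ws+d
-- (d = 1 on the very first iteration, d = 0 afterwards, exactly as the Python state evolves)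
def pySplitOuter (cs : List Char) (ws d : Nat) (acc : List (List Char)) : List (List Char) :=
  if ws < cs.length then
    let e := pyScan cs (ws + d)
    let w := PySem.List.slice cs (some (ws : Int)) (some (e : Int))   -- text[wordStart:wordEnd]
    pySplitOuter cs (e + 1) 0 (if PySem.Chars.strIsalnum w then acc ++ [w] else acc)
  else acc
termination_by cs.length - ws
decreasing_by
  have := pyScan_ge cs (ws + d)
  omega

-- splitText(text): wordStart = 0, wordEnd = 0, the first inner scan starts at wordEnd+1 = 1
def pySplitText (cs : List Char) : List (List Char) := pySplitOuter cs 0 1 []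

def getWordsStartingWith (text : String) (letter : String) : List String :=
  let l := (PySem.Str.lower letter).toList
  let cs := (PySem.Str.lower text).toList
  let words := pySplitText cs
  -- [word for word in words if word[0] == letter]  (word[0] is a 1-char string; splitText only emits non-empty words)
  let words2 := words.filter (fun w =>
    match PySem.List.pyGet? w 0 with
    | some c => [c] = l
    | none => False)   -- unreachable: words are non-empty
  -- toDel = [idx for idx in range(len(words)) if words[idx] in words[:idx]]
  let toDel := (List.range words2.length).filter (fun i => (words2.take i).contains (words2.getD i []))
  -- [words[idx] for idx in range(len(words)) if idx not in toDel]
  (((List.range words2.length).filter (fun i => ! toDel.contains i)).map (fun i => words2.getD i [])).map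
    (fun w => String.ofList w)

-- ===== PORT B =====
-- `if word and word[0] == letter and word not in results: results.append(word)`
def bFlush (l : List Char) (res : List (List Char)) (w : List Char) : List (List Char) :=
  match w with
  | [] => res
  | c :: _ => if [c] = l ∧ w ∉ res then res ++ [w] else res

def getWordsStartingWith_alt (text : String) (letter : String) : List String :=
  let l := (PySem.Str.lower letter).toList
  let st := (PySem.Str.lower text).toList.foldl
    (fun (st : List (List Char) × List Char) ch =>
      if PySem.Chars.isalnum ch then (st.1, st.2 ++ [ch]) else (bFlush l st.1 st.2, []))
    ([], [])
  (bFlush l st.1 st.2).map (fun w => String.ofList w)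

-- ===== PRECONDITION & SPEC =====
-- When the lowered text starts with exactly one non-alphanumeric character immediately
-- followed by an alphanumeric character equal to the lowered letter, splitText's
-- first-iteration off-by-one (`wordEnd += 1` before the inner scan) makes A silently drop
-- the text's first word; unless that same word reappears as the first later word starting
-- with the letter, A's list is missing it (e.g. A('.ab','a') = []) while B returns the
-- intended list of unique words beginning with the letter (['ab']).
def D_getWordsStartingWith (text : String) (letter : String) : Prop :=
  let cs := String.toList (PySem.Str.lower text)
  let w := (cs.drop 1).takeWhile PySem.Chars.isalnum
  cs.takeWhile PySem.Chars.isalnum = [] ∧ w ≠ [] ∧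
    String.toList (PySem.Str.lower letter) = w.take 1 ∧
    (((cs.drop 1).splitOnP (!PySem.Chars.isalnum ·)).filter (·.take 1 = w.take 1)).tail.head?
      ≠ some w
instance (text : String) (letter : String) : Decidable (D_getWordsStartingWith text letter) := by
  unfold D_getWordsStartingWith; infer_instance

def Spec_getWordsStartingWith (text : String) (letter : String) (out : List String) : Prop :=
  ¬ D_getWordsStartingWith text letter → out = getWordsStartingWith_alt text letter
instance (text : String) (letter : String) (out : List String) : Decidable (Spec_getWordsStartingWith text letter out) := by
  unfold Spec_getWordsStartingWith; infer_instance

def pvDiffWitness_getWordsStartingWith : String × String := (".ab", "a")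
def pvDiffWitnessOut_getWordsStartingWith : (List String) × (List String) := ([], ["ab"])

-- ===== CLAIM (what is proved, stated in full; the proofs are below) =====
def Claim_unchanged_getWordsStartingWith : Prop := ∀ (text : String) (letter : String), Dom_getWordsStartingWith text letter → Spec_getWordsStartingWith text letter (getWordsStartingWith text letter)
def Claim_exact_getWordsStartingWith : Prop := ∀ (text : String) (letter : String), Dom_getWordsStartingWith text letter → D_getWordsStartingWith text letter → getWordsStartingWith text letter ≠ getWordsStartingWith_alt text letter
def Claim_changed_getWordsStartingWith : Prop := Dom_getWordsStartingWith (pvDiffWitness_getWordsStartingWith.1) (pvDiffWitness_getWordsStartingWith.2) ∧ D_getWordsStartingWith (pvDiffWitness_getWordsStartingWith.1) (pvDiffWitness_getWordsStartingWith.2) ∧ getWordsStartingWith (pvDiffWitness_getWordsStartingWith.1) (pvDiffWitness_getWordsStartingWith.2) = pvDiffWitnessOut_getWordsStartingWith.1 ∧ getWordsStartingWith_alt (pvDiffWitness_getWordsStartingWith.1) (pvDiffWitness_getWordsStartingWith.2) = pvDiffWitnessOut_getWordsStartingWith.2 ∧ pvDiffWitnessOut_getWordsStartingWith.1 ≠ 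pvDiffWitnessOut_getWordsStartingWith.2

-- ===== LEMMAS AND PROOFS =====

-- the canonical word stream of cs (maximal alphanumeric runs), via an open-word accumulator
def dToks (w : List Char) : List Char → List (List Char)
  | [] => if w = [] then [] else [w]
  | c :: t => if PySem.Chars.isalnum c then dToks (w ++ [c]) t
              else if w = [] then dToks [] t else w :: dToks [] t

-- the keep-first-occurrence deduplication both programs implement
def kf (seen : List (List Char)) : List (List Char) → List (List Char)
  | [] => []
  | x :: xs => if x ∈ seen then kf seen xs else x :: kf (seen ++ [x]) xs

-- what B does to each flushed word
def dstep (l : List Char) (res : List (List Char)) (w : List Char) : List (List Char) :=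
  if w.take 1 = l ∧ w ∉ res then res ++ [w] else res

theorem pyScan_eq (cs : List Char) (i : Nat) :
    pyScan cs i = i + ((cs.drop i).takeWhile PySem.Chars.isalnum).length := by
  fun_induction pyScan with
  | case1 i h ih =>
    obtain ⟨hlt, hal⟩ := h
    have hd : cs.drop i = cs[i] :: cs.drop (i+1) := List.drop_eq_getElem_cons hlt
    have hg : cs.getD i ' ' = cs[i] := List.getD_eq_getElem cs ' ' hlt
    rw [ih, hd, List.takeWhile_cons_of_pos (by rw [← hg]; exact hal)]
    simp; omega
  | case2 i h =>
    by_cases hlt : i < cs.length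
    · have hal : PySem.Chars.isalnum (cs.getD i ' ') = false := by
        by_contra hc; exact h ⟨hlt, by simpa using hc⟩
      have hd : cs.drop i = cs[i] :: cs.drop (i+1) := List.drop_eq_getElem_cons hlt
      have hg : cs.getD i ' ' = cs[i] := List.getD_eq_getElem cs ' ' hlt
      rw [hd, List.takeWhile_cons_of_neg (by rw [← hg]; simp only [hal]; simp)]
      simp
    · rw [List.drop_eq_nil_of_le (by omega)]; simp

theorem aux1 (l : List Char) (p : Char → Bool) : l.dropWhile p = l.drop (l.takeWhile p).length := by
  induction l with
  | nil => simp
  | cons c t ih => by_cases h : p c <;> simp [h, ih]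

theorem aux2 (l : List Char) (p : Char → Bool) : l.take (l.takeWhile p).length = l.takeWhile p := by
  induction l with
  | nil => simp
  | cons c t ih => by_cases h : p c <;> simp [h, ih]

theorem aux3 (l : List Char) (p : Char → Bool) (c : Char) (r : List Char)
    (h : l.dropWhile p = c :: r) : p c = false := by
  induction l with
  | nil => simp at h
  | cons c' t ih =>
    by_cases h' : p c' <;> simp [h'] at h
    · exact ih h
    · obtain ⟨rfl, rfl⟩ := h; simpa using h'

theorem dToks_run (t : List Char) (w : List Char) (hw : w ≠ []) :
    dToks w t = (w ++ t.takeWhile PySem.Chars.isalnum) :: dToks [] (t.dropWhile PySem.Chars.isalnum) := by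
  induction t generalizing w with
  | nil => simp [dToks, hw]
  | cons c t ih =>
    by_cases hc : PySem.Chars.isalnum c
    · rw [List.takeWhile_cons_of_pos hc, List.dropWhile_cons_of_pos hc]
      simp only [dToks, hc, if_pos]
      rw [ih (w ++ [c]) (by simp)]
      simp
    · rw [List.takeWhile_cons_of_neg hc, List.dropWhile_cons_of_neg hc]
      simp only [dToks, hc]
      simp [hw]

-- one non-alphanumeric (or absent) leading character does not change the words
theorem dToks_drop_succ (cs : List Char) (e : Nat)
    (h : ∀ c r, cs.drop e = c :: r → PySem.Chars.isalnum c = false) :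
    dToks [] (cs.drop e) = dToks [] (cs.drop (e + 1)) := by
  rcases hd : cs.drop e with _ | ⟨c, r⟩
  · have : cs.length ≤ e := by
      have := congrArg List.length hd; simp at this; omega
    simp [List.drop_eq_nil_of_le (show cs.length ≤ e + 1 from by omega)]
  · have hr : cs.drop (e + 1) = r := by
      have := congrArg List.tail hd; simpa [List.tail_drop] using this
    rw [hr, dToks, if_neg (by simp [h c r hd]), if_pos rfl]

theorem splitOuter_eq (cs : List Char) (ws : Nat) (acc : List (List Char)) :
    pySplitOuter cs ws 0 acc = acc ++ dToks [] (cs.drop ws) := by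
  have main : ∀ n ws acc, cs.length - ws ≤ n →
      pySplitOuter cs ws 0 acc = acc ++ dToks [] (cs.drop ws) := by
    intro n
    induction n with
    | zero =>
      intro ws acc hn
      rw [pySplitOuter, if_neg (by omega), List.drop_eq_nil_of_le (by omega)]
      simp [dToks]
    | succ n ih =>
      intro ws acc hn
      by_cases hlt : ws < cs.length
      · rw [pySplitOuter]
        simp only [if_pos hlt]
        have hscan : pyScan cs (ws + 0) = ws + ((cs.drop ws).takeWhile PySem.Chars.isalnum).length := by
          rw [pyScan_eq]
          simp only [Nat.add_zero]
        set k := ((cs.drop ws).takeWhile PySem.Chars.isalnum).length with hk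
        have hslice : PySem.List.slice cs (some (ws : Int)) (some ((pyScan cs (ws + 0)) : Int))
            = (cs.drop ws).takeWhile PySem.Chars.isalnum := by
          rw [PySem.List.slice_natCast, hscan]
          have : ws + k - ws = k := by omega
          rw [this, hk, aux2]
        have hdropE : cs.drop (ws + k) = (cs.drop ws).dropWhile PySem.Chars.isalnum := by
          rw [aux1, ← hk, ← List.drop_drop]
        have hstep : dToks [] (cs.drop (ws + k)) = dToks [] (cs.drop (ws + k + 1)) := by
          apply dToks_drop_succ
          intro c r hcr
          exact aux3 (cs.drop ws) _ c r (by rw [← hdropE]; exact hcr)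
        rcases hcase : (cs.drop ws) with _ | ⟨c, r⟩
        · exfalso
          have := congrArg List.length hcase; simp at this; omega
        · by_cases hc : PySem.Chars.isalnum c
          · -- a word starts at ws
            have hrun : (cs.drop ws).takeWhile PySem.Chars.isalnum
                = c :: r.takeWhile PySem.Chars.isalnum := by
              rw [hcase, List.takeWhile_cons_of_pos hc]
            have hkpos : 1 ≤ k := by rw [hk, hrun]; simp
            have hasl : PySem.Chars.strIsalnum ((cs.drop ws).takeWhile PySem.Chars.isalnum) = true := by
              show (!((cs.drop ws).takeWhile PySem.Chars.isalnum).isEmpty &&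
                ((cs.drop ws).takeWhile PySem.Chars.isalnum).all PySem.Chars.isalnum) = true
              have h1 : ((cs.drop ws).takeWhile PySem.Chars.isalnum).isEmpty = false := by
                rw [hrun]; simp
              have h2 : ((cs.drop ws).takeWhile PySem.Chars.isalnum).all PySem.Chars.isalnum = true := by
                rw [List.all_eq_true]
                intro x hx
                exact List.mem_takeWhile_imp hx
              simp [h1, h2]
          -- after the run: recurse
            rw [hslice, hasl, if_pos rfl, hscan]
            rw [ih (ws + k + 1) _ (by omega)]
            have hTok : dToks [] (cs.drop ws) =
                ((cs.drop ws).takeWhile PySem.Chars.isalnum) :: dToks [] (cs.drop (ws + k + 1)) := by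
              rw [← hstep, hdropE, hcase, dToks, if_pos hc, List.nil_append,
                 dToks_run _ _ (by simp)]
              simp [List.takeWhile_cons_of_pos hc, List.dropWhile_cons_of_pos hc]
            have hfin : dToks [] (c :: r) =
                ((cs.drop ws).takeWhile PySem.Chars.isalnum) :: dToks [] (cs.drop (ws + k + 1)) := by
              rw [← hcase, hTok]
            rw [hfin]
            simp
          · -- no word at ws: empty slice, skip one character
            have hk0 : k = 0 := by
              rw [hk, hcase, List.takeWhile_cons_of_neg hc]; simp
            have hsl0 : PySem.List.slice cs (some (ws : Int)) (some ((pyScan cs (ws + 0)) : Int)) = [] := by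
              rw [hslice, hcase, List.takeWhile_cons_of_neg hc]
            rw [hsl0]
            have : PySem.Chars.strIsalnum ([] : List Char) = false := rfl
            rw [this, if_neg (by simp), hscan, hk0]
            rw [ih (ws + 0 + 1) _ (by omega)]
            congr 1
            rw [← hcase]
            have := hstep
            rw [hk0] at this
            simpa using this.symm
      · rw [pySplitOuter, if_neg hlt, List.drop_eq_nil_of_le (by omega)]
        simp [dToks]
  exact main (cs.length - ws) ws acc le_rfl

theorem dToks_skip (c : Char) (t : List Char) (hc : PySem.Chars.isalnum c = false) :
    dToks [] (c :: t) = dToks [] t := by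
  simp [dToks, hc]

theorem pySplitText_bug (c0 c1 : Char) (t : List Char)
    (h0 : PySem.Chars.isalnum c0 = false) (h1 : PySem.Chars.isalnum c1 = true) :
    pySplitText (c0 :: c1 :: t) = dToks [] (t.dropWhile PySem.Chars.isalnum) := by
  set cs := c0 :: c1 :: t with hcs
  have hlt : 0 < cs.length := by simp [hcs]
  rw [pySplitText, pySplitOuter]
  simp only [if_pos hlt]
  have htw : (cs.drop 1).takeWhile PySem.Chars.isalnum = c1 :: t.takeWhile PySem.Chars.isalnum := by
    simp [hcs, List.takeWhile_cons_of_pos h1]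
  have hscan : pyScan cs (0 + 1) = 1 + (1 + (t.takeWhile PySem.Chars.isalnum).length) := by
    rw [pyScan_eq, htw]; simp; omega
  rw [hscan, PySem.List.slice_natCast]
  set e := 1 + (1 + (t.takeWhile PySem.Chars.isalnum).length) with he
  have htk : (cs.drop 0).take (e - 0) = c0 :: (c1 :: t).take (e - 1) := by
    rw [hcs]; rw [show e - 0 = (e - 1) + 1 from by omega]; simp
  have hbad : PySem.Chars.strIsalnum ((cs.drop 0).take (e - 0)) = false := by
    show (!((cs.drop 0).take (e - 0)).isEmpty && ((cs.drop 0).take (e - 0)).all PySem.Chars.isalnum) = false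
    rw [htk]
    simp [h0]
  rw [hbad]
  simp only [Bool.false_eq_true, if_false]
  rw [splitOuter_eq]
  have hdrop : cs.drop e = t.dropWhile PySem.Chars.isalnum := by
    have h2 : cs.drop e = (cs.drop 1).drop (e - 1) := by
      rw [List.drop_drop]; congr 1; omega
    have h3 : e - 1 = ((cs.drop 1).takeWhile PySem.Chars.isalnum).length := by
      rw [htw]; simp [he]; omega
    rw [h2, h3, ← aux1 (cs.drop 1), hcs]
    simp [List.dropWhile_cons_of_pos h1]
  have hstep : dToks [] (cs.drop e) = dToks [] (cs.drop (e + 1)) := by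
    apply dToks_drop_succ
    intro c r hcr
    apply aux3 t PySem.Chars.isalnum c r
    rw [← hdrop]; exact hcr
  rw [← hstep, hdrop]
  simp

theorem pySplitText_eq (cs : List Char)
    (h : ¬ (2 ≤ cs.length ∧ PySem.Chars.isalnum (cs.getD 0 ' ') = false ∧ PySem.Chars.isalnum (cs.getD 1 ' ') = true)) :
    pySplitText cs = dToks [] cs := by
  rcases cs with _ | ⟨c0, t0⟩
  · rw [pySplitText, pySplitOuter]
    simp [dToks]
  rcases t0 with _ | ⟨c1, t⟩
  · -- a single character
    rw [pySplitText, pySplitOuter]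
    have hlt : 0 < ([c0] : List Char).length := by simp
    simp only [if_pos hlt]
    have hscan : pyScan [c0] (0 + 1) = 1 := by rw [pyScan_eq]; simp
    rw [hscan, PySem.List.slice_natCast]
    have hsl : (([c0] : List Char).drop 0).take (1 - 0) = [c0] := by simp
    rw [hsl]
    by_cases hc : PySem.Chars.isalnum c0
    · have : PySem.Chars.strIsalnum [c0] = true := by
        show (!([c0] : List Char).isEmpty && ([c0] : List Char).all PySem.Chars.isalnum) = true
        simp [hc]
      rw [this, if_pos rfl, splitOuter_eq]
      simp [dToks, hc]
    · have : PySem.Chars.strIsalnum [c0] = false := by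
        show (!([c0] : List Char).isEmpty && ([c0] : List Char).all PySem.Chars.isalnum) = false
        simp [hc]
      rw [this]
      simp only [Bool.false_eq_true, if_false]
      rw [splitOuter_eq, dToks_skip c0 [] (by simpa using hc)]
      simp [dToks]
  · -- length ≥ 2
    set cs := c0 :: c1 :: t with hcs
    have hlen : 2 ≤ cs.length := by simp [hcs]
    have hg0 : cs.getD 0 ' ' = c0 := rfl
    have hg1 : cs.getD 1 ' ' = c1 := rfl
    by_cases h0 : PySem.Chars.isalnum c0
    · -- text starts inside a word: the first scan from 1 computes the same end
      have h01 : pyScan cs (0 + 0) = pyScan cs (0 + 1) := by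
        conv_lhs => rw [pyScan]
        have hcond : 0 + 0 < cs.length ∧ PySem.Chars.isalnum (cs.getD (0 + 0) ' ') = true :=
          ⟨by simp [hcs], by rw [show cs.getD (0 + 0) ' ' = c0 from rfl]; exact h0⟩
        rw [dif_pos hcond]
      have : pySplitText cs = pySplitOuter cs 0 0 [] := by
        rw [pySplitText, pySplitOuter]
        conv_rhs => rw [pySplitOuter]
        rw [h01]
      rw [this, splitOuter_eq]
      simp
    · -- two leading delimiters
      have h1 : PySem.Chars.isalnum c1 = false := by
        rcases Bool.eq_false_or_eq_true (PySem.Chars.isalnum c1) with hb | hb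
        · exact absurd ⟨hlen, by rw [hg0]; simpa using h0, by rw [hg1]; exact hb⟩ h
        · exact hb
      rw [pySplitText, pySplitOuter]
      have hlt : 0 < cs.length := by simp [hcs]
      simp only [if_pos hlt]
      have hscan : pyScan cs (0 + 1) = 1 := by
        rw [pyScan_eq]
        have : cs.drop 1 = c1 :: t := by simp [hcs]
        rw [this, List.takeWhile_cons_of_neg (by simp [h1])]
        simp
      rw [hscan, PySem.List.slice_natCast]
      have hsl : ((cs.drop 0).take (1 - 0)) = [c0] := by simp [hcs]
      rw [hsl]
      have : PySem.Chars.strIsalnum [c0] = false := by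
        show (!([c0] : List Char).isEmpty && ([c0] : List Char).all PySem.Chars.isalnum) = false
        simp [h0]
      rw [this]
      simp only [Bool.false_eq_true, if_false]
      rw [splitOuter_eq]
      have : cs.drop 2 = t := by simp [hcs]
      rw [this, hcs, dToks_skip c0 _ (by simpa using h0), dToks_skip c1 _ (by simpa using h1)]
      simp

theorem kf_congr (s s' : List (List Char)) (xs : List (List Char))
    (h : ∀ y, y ∈ s ↔ y ∈ s') : kf s xs = kf s' xs := by
  induction xs generalizing s s' with
  | nil => rfl
  | cons x xs ih =>
    rw [kf, kf]
    by_cases hx : x ∈ s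
    · rw [if_pos hx, if_pos ((h x).mp hx), ih s s' h]
    · rw [if_neg hx, if_neg (fun hc => hx ((h x).mpr hc)),
        ih (s ++ [x]) (s' ++ [x]) (by intro y; simp [h y])]

theorem bFlush_eq_dstep (l : List Char) (res : List (List Char)) (w : List Char) (hw : w ≠ []) :
    bFlush l res w = dstep l res w := by
  rcases w with _ | ⟨c, w'⟩
  · exact absurd rfl hw
  · rw [bFlush, dstep]; simp

theorem dedup_eq (ys : List (List Char)) (pre : List (List Char)) :
    (((List.range ys.length).filter (fun i => !(pre ++ ys.take i).contains (ys.getD i []))).map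
      (fun i => ys.getD i [])) = kf pre ys := by
  induction ys generalizing pre with
  | nil => rfl
  | cons x xs ih =>
    rw [show (x :: xs).length = xs.length + 1 from rfl, List.range_succ_eq_map, List.filter_cons]
    have hcomp : ((fun i => !(pre ++ (x :: xs).take i).contains ((x :: xs).getD i [])) ∘ Nat.succ)
        = fun i => !((pre ++ [x]) ++ xs.take i).contains (xs.getD i []) := by
      funext i
      simp [Function.comp, List.take_succ_cons, List.append_assoc]
    have hmap : ((fun i => (x :: xs).getD i []) ∘ Nat.succ) = fun i => xs.getD i [] := by
      funext i; rfl
    by_cases hx : x ∈ pre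
    · have hcond : (!(pre ++ (x :: xs).take 0).contains ((x :: xs).getD 0 [])) = false := by
        simp [hx]
      rw [hcond]
      simp only [Bool.false_eq_true, if_false]
      rw [List.filter_map, List.map_map, hcomp, hmap, ih (pre ++ [x])]
      rw [kf, if_pos hx, kf_congr (pre ++ [x]) pre xs (by
        intro y
        simp only [List.mem_append, List.mem_singleton]
        constructor
        · rintro (hy | rfl)
          · exact hy
          · exact hx
        · exact Or.inl)]
    · have hcond : (!(pre ++ (x :: xs).take 0).contains ((x :: xs).getD 0 [])) = true := by
        simp [hx]
      rw [hcond]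
      simp only [if_true]
      rw [List.map_cons, List.filter_map, List.map_map, hcomp, hmap, ih (pre ++ [x])]
      rw [kf, if_neg hx]
      rfl

theorem dedupA_eq (ys : List (List Char)) :
    (((List.range ys.length).filter (fun i =>
        ! ((List.range ys.length).filter (fun j => (ys.take j).contains (ys.getD j []))).contains i)).map
      (fun i => ys.getD i [])) = kf [] ys := by
  rw [← dedup_eq ys []]
  congr 1
  apply List.filter_congr
  intro i hi
  simp only [List.mem_range] at hi
  simp [List.mem_filter, List.mem_range, hi]

theorem foldl_flush_eq (l : List Char) (cs : List Char) (res : List (List Char)) (w : List Char) :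
    bFlush l
      (cs.foldl (fun (st : List (List Char) × List Char) ch =>
        if PySem.Chars.isalnum ch then (st.1, st.2 ++ [ch]) else (bFlush l st.1 st.2, [])) (res, w)).1
      (cs.foldl (fun (st : List (List Char) × List Char) ch =>
        if PySem.Chars.isalnum ch then (st.1, st.2 ++ [ch]) else (bFlush l st.1 st.2, [])) (res, w)).2
    = (dToks w cs).foldl (dstep l) res := by
  induction cs generalizing res w with
  | nil =>
    simp only [List.foldl_nil]
    rcases hw : w with _ | ⟨c, w'⟩
    · rfl
    · rw [dToks, if_neg (by simp), List.foldl_cons, List.foldl_nil,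
        bFlush_eq_dstep l res _ (by simp)]
  | cons ch cs ih =>
    by_cases hch : PySem.Chars.isalnum ch
    · simp only [List.foldl_cons]
      rw [if_pos hch, ih, dToks, if_pos hch]
    · simp only [List.foldl_cons]
      rw [if_neg hch, ih, dToks, if_neg hch]
      rcases w with _ | ⟨c, w'⟩
      · rw [if_pos rfl]
        rfl
      · rw [if_neg (by simp), List.foldl_cons, bFlush_eq_dstep l res _ (by simp)]

theorem fuse_eq (l : List Char) (ts : List (List Char)) (res : List (List Char)) :
    ts.foldl (dstep l) res = res ++ kf res (ts.filter (fun w => w.take 1 = l)) := by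
  induction ts generalizing res with
  | nil => simp [kf]
  | cons w ts ih =>
    rw [List.foldl_cons, List.filter_cons]
    by_cases hp : w.take 1 = l
    · rw [if_pos (by simpa using hp)]
      by_cases hw : w ∈ res
      · rw [dstep, if_neg (by tauto), ih, kf, if_pos hw]
      · rw [dstep, if_pos ⟨hp, hw⟩, ih, kf, if_neg hw]
        simp
    · rw [if_neg (by simpa using hp), dstep, if_neg (by tauto), ih]

theorem filter_head_eq (l : List Char) (ts : List (List Char)) (h : ∀ x ∈ ts, x ≠ []) :
    (ts.filter (fun w =>
      match PySem.List.pyGet? w 0 with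
      | some c => [c] = l
      | none => False))
    = ts.filter (fun w => w.take 1 = l) := by
  apply List.filter_congr
  intro w hw
  rcases hn : w with _ | ⟨c, w'⟩
  · exact absurd hn (h w hw)
  · simp [PySem.List.pyGet?, PySem.List.pyIdx?]

theorem dToks_ne (t : List Char) (w : List Char) : ∀ x ∈ dToks w t, x ≠ [] := by
  induction t generalizing w with
  | nil =>
    intro x hx
    by_cases hw : w = [] <;> simp [dToks, hw] at hx
    simp [hx, hw]
  | cons c t ih =>
    intro x hx
    simp only [dToks] at hx
    split at hx
    · exact ih _ x hx
    · split at hx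
      · exact ih _ x hx
      · rcases List.mem_cons.mp hx with h | h
        · subst h; assumption
        · exact ih _ x h

theorem splitText_ne (cs : List Char) : ∀ x ∈ pySplitText cs, x ≠ [] := by
  by_cases hb : 2 ≤ cs.length ∧ PySem.Chars.isalnum (cs.getD 0 ' ') = false ∧
      PySem.Chars.isalnum (cs.getD 1 ' ') = true
  · rcases cs with _ | ⟨c0, _ | ⟨c1, t⟩⟩
    · simp at hb
    · obtain ⟨h2, -⟩ := hb; simp at h2
    · rw [pySplitText_bug c0 c1 t (by exact hb.2.1) (by exact hb.2.2)]
      exact dToks_ne _ []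
  · rw [pySplitText_eq cs hb]
    exact dToks_ne _ []

theorem portA_pipeline (text letter : String) :
    getWordsStartingWith text letter
    = (kf [] ((pySplitText (PySem.Str.lower text).toList).filter
        (fun w => w.take 1 = (PySem.Str.lower letter).toList))).map (fun w => String.ofList w) := by
  simp only [getWordsStartingWith]
  rw [filter_head_eq _ _ (splitText_ne _), dedupA_eq]

theorem portB_pipeline (text letter : String) :
    getWordsStartingWith_alt text letter
    = (kf [] ((dToks [] (PySem.Str.lower text).toList).filter
        (fun w => w.take 1 = (PySem.Str.lower letter).toList))).map (fun w => String.ofList w) := by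
  simp only [getWordsStartingWith_alt]
  rw [foldl_flush_eq, fuse_eq]
  simp

-- in the D_ shape, B's token stream is A's with the dropped first word prepended
theorem bug_split (c0 c1 : Char) (t : List Char)
    (h0 : PySem.Chars.isalnum c0 = false) (h1 : PySem.Chars.isalnum c1 = true) :
    dToks [] (c0 :: c1 :: t)
      = (c1 :: t.takeWhile PySem.Chars.isalnum) :: dToks [] (t.dropWhile PySem.Chars.isalnum) := by
  rw [dToks_skip c0 _ h0, dToks, if_pos h1]
  simp only [List.nil_append]
  rw [dToks_run t [c1] (by simp)]
  simp


-- splitOnP on a string starting inside an alphanumeric run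
theorem splitOnP_cons_alnum (x : Char) (t : List Char) (hx : PySem.Chars.isalnum x = true) :
    List.splitOnP (fun c => !PySem.Chars.isalnum c) (x :: t)
      = (x :: t.takeWhile PySem.Chars.isalnum) ::
        (List.splitOnP (fun c => !PySem.Chars.isalnum c) (t.dropWhile PySem.Chars.isalnum)).tail := by
  induction t generalizing x with
  | nil => rw [List.splitOnP_cons, List.splitOnP_nil]; simp [hx]
  | cons y v ih =>
    rw [List.splitOnP_cons]
    simp only [hx, Bool.not_true, Bool.false_eq_true, if_false]
    by_cases hy : PySem.Chars.isalnum y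
    · rw [ih y hy, List.takeWhile_cons_of_pos hy, List.dropWhile_cons_of_pos hy]
      rfl
    · rw [List.takeWhile_cons_of_neg hy, List.dropWhile_cons_of_neg hy, List.splitOnP_cons]
      simp [hy]

-- after a maximal run, the tail of the split and the split itself filter the same
theorem splitOnP_tail_filter (c : Char) (t : List Char) :
    ((List.splitOnP (fun x => !PySem.Chars.isalnum x) (t.dropWhile PySem.Chars.isalnum)).tail.filter
        (fun w => w.take 1 = [c]))
      = ((List.splitOnP (fun x => !PySem.Chars.isalnum x) (t.dropWhile PySem.Chars.isalnum)).filter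
        (fun w => w.take 1 = [c])) := by
  rcases h : t.dropWhile PySem.Chars.isalnum with _ | ⟨y, v⟩
  · rw [List.splitOnP_nil]
    simp
  · have hy : PySem.Chars.isalnum y = false := aux3 t PySem.Chars.isalnum y v h
    rw [List.splitOnP_cons]
    simp [hy]

-- the head of the letter-filtered split equals the head of the letter-filtered token stream
theorem split_head (c : Char) (u : List Char) :
    ((List.splitOnP (fun x => !PySem.Chars.isalnum x) u).filter (fun w => w.take 1 = [c])).head?
      = ((dToks [] u).filter (fun w => w.take 1 = [c])).head? := by
  have main : ∀ n u, u.length ≤ n →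
      ((List.splitOnP (fun x => !PySem.Chars.isalnum x) u).filter (fun w => w.take 1 = [c])).head?
        = ((dToks [] u).filter (fun w => w.take 1 = [c])).head? := by
    intro n
    induction n with
    | zero =>
      intro u hu
      have hu0 : u = [] := List.length_eq_zero_iff.mp (by omega)
      subst hu0
      rw [List.splitOnP_nil]
      simp [dToks]
    | succ n ih =>
      intro u hu
      rcases u with _ | ⟨x, t⟩
      · rw [List.splitOnP_nil]
        simp [dToks]
      · by_cases hx : PySem.Chars.isalnum x
        · have htok : dToks [] (x :: t)
              = (x :: t.takeWhile PySem.Chars.isalnum) :: dToks [] (t.dropWhile PySem.Chars.isalnum) := by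
            rw [dToks, if_pos hx, List.nil_append, dToks_run t [x] (by simp)]
            simp
          rw [htok, splitOnP_cons_alnum x t hx, List.filter_cons, List.filter_cons]
          by_cases hc : x = c
          · rw [if_pos (by simp [hc]), if_pos (by simp [hc])]
            simp
          · rw [if_neg (by simp [hc]), if_neg (by simp [hc]), splitOnP_tail_filter]
            exact ih (t.dropWhile PySem.Chars.isalnum)
              (by have := t.length_dropWhile_le PySem.Chars.isalnum; simp at hu; omega)
        · rw [dToks_skip x t (by simpa using hx), List.splitOnP_cons]
          simp only [hx, Bool.not_false, if_pos]
          rw [List.filter_cons, if_neg (by simp)]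
          exact ih t (by simp at hu; omega)
  exact main u.length u le_rfl

-- keeping a word already first in the stream changes nothing
theorem kf_dup (F : List Char) (zs : List (List Char)) :
    kf [] (F :: F :: zs) = kf [] (F :: zs) := by
  rw [kf, if_neg (by simp), kf, if_pos (by simp), kf, if_neg (by simp)]

theorem kf_head (xs : List (List Char)) : (kf [] xs).head? = xs.head? := by
  rcases xs with _ | ⟨x, t⟩
  · rfl
  · rw [kf, if_neg (by simp)]
    rfl

-- ===== VERDICT (by name: the statement is the Claim_ definition above) =====
theorem getWordsStartingWith_spec : Claim_unchanged_getWordsStartingWith := by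
  intro text letter _ hnd
  rw [portA_pipeline, portB_pipeline]
  by_cases hb : 2 ≤ ((PySem.Str.lower text).toList).length ∧
      PySem.Chars.isalnum (((PySem.Str.lower text).toList).getD 0 ' ') = false ∧
      PySem.Chars.isalnum (((PySem.Str.lower text).toList).getD 1 ' ') = true
  · rcases hcs : (PySem.Str.lower text).toList with _ | ⟨c0, _ | ⟨c1, t⟩⟩
    · rw [hcs] at hb; simp at hb
    · rw [hcs] at hb; obtain ⟨h2, -⟩ := hb; simp at h2
    · rw [hcs] at hb
      have h0 : PySem.Chars.isalnum c0 = false := hb.2.1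
      have h1 : PySem.Chars.isalnum c1 = true := hb.2.2
      rw [pySplitText_bug c0 c1 t h0 h1, bug_split c0 c1 t h0 h1]
      set l := (PySem.Str.lower letter).toList with hl
      by_cases hlc : l = [c1]
      · -- the dropped word starts with the letter; ¬ D_ forces it to be the first
        -- letter-word of the rest, after which deduplication makes the lists equal
        have hfw : ((dToks [] (t.dropWhile PySem.Chars.isalnum)).filter
              (fun w => w.take 1 = [c1])).head?
            = some (c1 :: t.takeWhile PySem.Chars.isalnum) := by
          by_contra hne
          apply hnd
          unfold D_getWordsStartingWith
          rw [hcs]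
          refine ⟨?_, ?_, ?_, ?_⟩
          · rw [List.takeWhile_cons_of_neg (by simp [h0])]
          · simp [List.takeWhile_cons_of_pos h1]
          · simp only [List.drop_succ_cons, List.drop_zero, List.takeWhile_cons_of_pos h1,
              List.take_succ_cons, List.take_zero]
            exact hlc
          · simp only [List.drop_succ_cons, List.drop_zero, List.takeWhile_cons_of_pos h1,
              List.take_succ_cons, List.take_zero, splitOnP_cons_alnum c1 t h1,
              List.filter_cons, decide_eq_true_eq]
            rw [if_pos (by simp), List.tail_cons, splitOnP_tail_filter, split_head]
            exact hne
        rcases hfl : (dToks [] (t.dropWhile PySem.Chars.isalnum)).filter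
            (fun w => w.take 1 = [c1]) with _ | ⟨y, zs⟩
        · rw [hfl] at hfw; simp at hfw
        · rw [hfl] at hfw
          simp only [List.head?_cons, Option.some.injEq] at hfw
          rw [hlc, List.filter_cons, if_pos (by simp), hfl, hfw, kf_dup]
      · rw [List.filter_cons, if_neg (by
          simp only [List.take_succ_cons, List.take_zero, decide_eq_true_eq]
          exact fun hc => hlc hc.symm)]
  · rw [pySplitText_eq _ hb]

theorem getWordsStartingWith_changed : Claim_changed_getWordsStartingWith := by
  unfold Claim_changed_getWordsStartingWith
  have hcs : (PySem.Str.lower ".ab").toList = ['.', 'a', 'b'] := by decide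
  refine ⟨by decide, by decide, ?_, by decide, by decide⟩
  show getWordsStartingWith ".ab" "a" = []
  rw [portA_pipeline, hcs, pySplitText_bug '.' 'a' ['b'] (by decide) (by decide)]
  decide

theorem getWordsStartingWith_tight : Claim_exact_getWordsStartingWith := by
  intro text letter _ hD
  unfold D_getWordsStartingWith at hD
  rcases hcs : (PySem.Str.lower text).toList with _ | ⟨c0, _ | ⟨c1, t⟩⟩ <;> rw [hcs] at hD
  · obtain ⟨-, h2, -, -⟩ := hD; simp at h2
  · obtain ⟨-, h2, -, -⟩ := hD; simp at h2
  · obtain ⟨htk, hw, hl', hfw'⟩ := hD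
    have h0 : PySem.Chars.isalnum c0 = false := by
      rcases hb : PySem.Chars.isalnum c0 with _ | _
      · rfl
      · rw [List.takeWhile_cons_of_pos hb] at htk; simp at htk
    have h1 : PySem.Chars.isalnum c1 = true := by
      rcases hb : PySem.Chars.isalnum c1 with _ | _
      · rw [List.drop_succ_cons, List.drop_zero,
          List.takeWhile_cons_of_neg (by simp [hb])] at hw
        exact absurd rfl hw
      · rfl
    simp only [List.drop_succ_cons, List.drop_zero, List.takeWhile_cons_of_pos h1,
      List.take_succ_cons, List.take_zero] at hl' hfw'
    rw [splitOnP_cons_alnum c1 t h1, List.filter_cons, if_pos (by simp), List.tail_cons,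
      splitOnP_tail_filter, split_head] at hfw'
    rw [portA_pipeline, portB_pipeline, hcs,
      pySplitText_bug c0 c1 t h0 h1, bug_split c0 c1 t h0 h1, hl']
    set F := c1 :: t.takeWhile PySem.Chars.isalnum with hF
    set xs := (dToks [] (t.dropWhile PySem.Chars.isalnum)).filter
      (fun w => w.take 1 = [c1]) with hxs
    intro hcon
    have hheads := congrArg List.head? hcon
    rw [List.filter_cons, if_pos (by simp [hF]), List.head?_map, List.head?_map,
      kf_head, kf_head, List.head?_cons] at hheads
    rcases hx : xs.head? with _ | y
    · rw [hx] at hheads; simp at hheads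
    · rw [hx] at hheads
      simp only [Option.map_some, Option.some.injEq] at hheads
      have hyF : y = F := by
        have := congrArg String.toList hheads
        simpa using this
      rw [hyF] at hx
      exact hfw' hx
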